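-- pv_equiv track=rewrite | github.com/yedkk/python-datastructure-algorithm | data structure and algorithm/calculator_implement.py | findNextOpr
-- ===== SOURCE A (Python) =====
-- def findNextOpr(txt):
--     """
--         >>> findNextOpr('  3*   4 - 5')
--         3
--         >>> findNextOpr('8   4 - 5')
--         6
--         >>> findNextOpr('89 4 5')
--         -1
--     """
--
-- # decide whether the data type is correct
--     if not isinstance(txt, str) or len(txt) <= 0:
--         return "error: findNextOpr"
--
-- # use for loop to search
--     for pos in range(0, txt.__len__()):
--
-- # if find, return pos
--         if txt[pos] == '*' or txt[pos] == '/' or txt[pos] == '+' or txt[pos] == '^':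
--             return pos
--
-- # search next
--         if txt[pos] == '-':
--             if(len(txt[0:pos])==0 or txt[0:pos].replace('(',' ').isspace()):
--                 continue;
--             else:
--                 return pos;
--
-- #if cannot search, return -1
--     return -1
-- ===== SOURCE B (Python) =====
-- def findNextOpr(txt):
--     # Single pass: keep an incremental flag saying whether every character seen
--     # so far is whitespace or '(' (a unary-minus prefix), instead of re-scanning
--     # the prefix for each '-'.
--     prefix_ok = True
--     for pos, c in enumerate(txt):
--         if c in '*/+^':
--             return pos
--         if c == '-' and not prefix_ok:
--             return pos
--         prefix_ok = prefix_ok and (c.isspace() or c == '(')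
--     return -1
-- ===== Notes on version B (the rewrite author's own statement) =====
-- stated objective: faster
-- what changed: A rescans the whole prefix (slice + replace + isspace) every time it meets a '-'; B makes one pass maintaining a boolean flag 'prefix so far is all whitespace/(' incrementally, so the inner rescan disappears.
-- outside the precondition, e.g. on findNextOpr(''): A returns 'error: findNextOpr', B returns -1
import Mathlib
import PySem

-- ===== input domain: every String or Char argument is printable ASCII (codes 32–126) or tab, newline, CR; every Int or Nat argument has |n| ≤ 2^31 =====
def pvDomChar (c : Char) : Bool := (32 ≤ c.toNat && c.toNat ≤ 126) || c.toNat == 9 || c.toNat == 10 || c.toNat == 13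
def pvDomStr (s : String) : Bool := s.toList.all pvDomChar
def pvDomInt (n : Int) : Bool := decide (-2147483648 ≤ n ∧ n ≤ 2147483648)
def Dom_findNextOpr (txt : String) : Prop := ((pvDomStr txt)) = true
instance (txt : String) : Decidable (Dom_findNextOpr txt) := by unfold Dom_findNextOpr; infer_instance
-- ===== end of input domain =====

-- B replaces A's per-'-' rescan of the prefix (txt[0:pos].replace('(',' ').isspace())
-- by one incrementally maintained flag: a single pass, O(n) instead of O(n^2).

-- ===== PORT A =====
-- the for-loop of A: pos runs over range(0, len(txt)); early returns become base cases
def pvALoop (cs : List Char) (pos : Nat) : Int :=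
  if h : pos < cs.length then
    let c := cs[pos]
    if c = '*' ∨ c = '/' ∨ c = '+' ∨ c = '^' then (pos : Int)
    else if c = '-' then
      -- txt[0:pos] as a slice, then .replace('(',' ').isspace()
      let pre := PySem.List.slice cs (some (0 : Int)) (some (pos : Int))
      if pre.length = 0 ∨ PySem.Chars.strIsspace (PySem.Chars.replace pre ['('] [' ']) = true then
        pvALoop cs (pos + 1)
      else (pos : Int)
    else pvALoop cs (pos + 1)
  else (-1 : Int)
termination_by cs.length - pos

-- A returns the string "error: findNextOpr" (not an int) on empty input; that case is
-- outside Pre_ below, so the port just runs the loop.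
def findNextOpr (txt : String) : Int := pvALoop txt.toList 0

-- ===== PORT B =====
-- B's single pass: flag = "every char so far is whitespace or '('"
def pvBLoop (cs : List Char) (pos : Nat) (flag : Bool) : Int :=
  match cs with
  | [] => (-1 : Int)
  | c :: rest =>
    if c = '*' ∨ c = '/' ∨ c = '+' ∨ c = '^' then (pos : Int)
    else if c = '-' ∧ flag = false then (pos : Int)
    else pvBLoop rest (pos + 1) (flag && (PySem.Chars.isspace c || c = '('))

def findNextOpr_alt (txt : String) : Int := pvBLoop txt.toList 0 true

-- ===== PRECONDITION & SPEC =====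
-- Pre_ excludes the empty string, on which A returns the string "error: findNextOpr",
-- not an int (B returns -1 there).
def Pre_findNextOpr (txt : String) : Prop := txt ≠ ""
instance (txt : String) : Decidable (Pre_findNextOpr txt) := by unfold Pre_findNextOpr; infer_instance
def pvWitness_findNextOpr : String := "  3*   4 - 5"

def Spec_findNextOpr (txt : String) (out : Int) : Prop := out = findNextOpr_alt txt
instance (txt : String) (out : Int) : Decidable (Spec_findNextOpr txt out) := by unfold Spec_findNextOpr; infer_instance

-- ===== CLAIM (what is proved, stated in full; the proofs are below) =====
def Claim_equal_findNextOpr : Prop := ∀ (txt : String), Dom_findNextOpr txt → Pre_findNextOpr txt → Spec_findNextOpr txt (findNextOpr txt)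

-- ===== LEMMAS AND PROOFS =====

-- the prefix predicate B maintains incrementally
def pvOkChar (c : Char) : Bool := PySem.Chars.isspace c || c = '('

-- single-character replace is a pointwise map (fact about A's replace('(',' ') call)
lemma pv_replace_go_single (fuel : Nat) (l acc : List Char) (h : l.length ≤ fuel) :
    PySem.Chars.replace.go ['('] [' '] fuel l acc
      = acc.reverse ++ l.map (fun c => if c = '(' then ' ' else c) := by
  induction fuel generalizing l acc with
  | zero =>
    have : l = [] := List.length_eq_zero_iff.mp (Nat.le_zero.mp h)
    subst this
    simp [PySem.Chars.replace.go]
  | succ n ih =>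
    cases l with
    | nil => simp [PySem.Chars.replace.go]
    | cons c t =>
      have hle : t.length ≤ n := by simpa using Nat.lt_succ_iff.mp (by simpa using h)
      by_cases hc : c = '('
      · subst hc
        rw [PySem.Chars.replace.go]
        simp [List.isPrefixOf, ih t (' ' :: acc) hle]
      · rw [PySem.Chars.replace.go]
        have hpf : (['('].isPrefixOf (c :: t)) = false := by
          simp [List.isPrefixOf]
          exact fun hcc => absurd hcc.symm hc
        rw [hpf]
        simp [ih t (c :: acc) hle, hc]

lemma pv_replace_single (l : List Char) :
    PySem.Chars.replace l ['('] [' '] = l.map (fun c => if c = '(' then ' ' else c) := by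
  unfold PySem.Chars.replace
  simp only [List.isEmpty_cons, Bool.false_eq_true, if_false]
  exact pv_replace_go_single l.length l [] le_rfl

-- A's prefix test equals "all chars are whitespace or '('"
lemma pv_cond_iff (pre : List Char) :
    (pre.length = 0 ∨ PySem.Chars.strIsspace (PySem.Chars.replace pre ['('] [' ']) = true)
      ↔ pre.all pvOkChar = true := by
  rw [pv_replace_single]
  unfold PySem.Chars.strIsspace
  rw [List.all_map]
  have hpt : (PySem.Chars.isspace ∘ fun c => if c = '(' then ' ' else c) = pvOkChar := by
    funext c
    by_cases hc : c = '('
    · subst hc; decide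
    · simp [Function.comp, pvOkChar, hc]
  rw [hpt]
  cases pre with
  | nil => simp
  | cons c t => simp

-- loop correspondence: A at position pos = B on the remaining suffix with the flag
lemma pv_main (cs : List Char) (pos : Nat) (hpos : pos ≤ cs.length) :
    pvALoop cs pos = pvBLoop (cs.drop pos) pos ((cs.take pos).all pvOkChar) := by
  induction hn : cs.length - pos generalizing pos with
  | zero =>
    have hp : pos = cs.length := by omega
    subst hp
    rw [pvALoop]
    simp [pvBLoop]
  | succ n ih =>
    have h : pos < cs.length := by omega
    have hdrop : cs.drop pos = cs[pos] :: cs.drop (pos + 1) := List.drop_eq_getElem_cons h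
    have htake : cs.take (pos + 1) = cs.take pos ++ [cs[pos]] := by
      rw [List.take_add_one]
      simp [List.getElem?_eq_getElem h]
    rw [pvALoop, dif_pos h, hdrop, pvBLoop]
    set c := cs[pos] with hc
    by_cases hop : c = '*' ∨ c = '/' ∨ c = '+' ∨ c = '^'
    · simp [hop]
    · rw [if_neg hop, if_neg hop]
      by_cases hm : c = '-'
      · rw [if_pos hm]
        have hslice : PySem.List.slice cs (some (0 : Int)) (some (pos : Int)) = cs.take pos := by
          rw [show ((0 : Int)) = ((0 : Nat) : Int) from rfl, PySem.List.slice_natCast]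
          simp
        rw [hslice]
        by_cases hcond : ((cs.take pos).length = 0 ∨
            PySem.Chars.strIsspace (PySem.Chars.replace (cs.take pos) ['('] [' ']) = true)
        · rw [if_pos hcond]
          have hflag : (cs.take pos).all pvOkChar = true := (pv_cond_iff _).mp hcond
          have hnotret : ¬ (c = '-' ∧ (cs.take pos).all pvOkChar = false) := by
            rw [hflag]; rintro ⟨_, h2⟩; exact absurd h2 (by simp)
          rw [if_neg hnotret]
          rw [ih (pos + 1) (by omega) (by omega)]
          congr 1
          rw [htake, List.all_append, hflag]
          simp [pvOkChar, hm]
        · rw [if_neg hcond]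
          have hflag : (cs.take pos).all pvOkChar = false :=
            Bool.eq_false_iff.mpr (fun ht => hcond ((pv_cond_iff _).mpr ht))
          rw [if_pos ⟨hm, hflag⟩]
      · rw [if_neg hm]
        have hnotret : ¬ (c = '-' ∧ (cs.take pos).all pvOkChar = false) := by
          rintro ⟨h1, _⟩; exact hm h1
        rw [if_neg hnotret]
        rw [ih (pos + 1) (by omega) (by omega)]
        congr 1
        rw [htake, List.all_append]
        simp [pvOkChar]

-- ===== VERDICT (by name: the statement is the Claim_ definition above) =====
theorem findNextOpr_spec : Claim_equal_findNextOpr := by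
  intro txt _ _
  unfold Spec_findNextOpr findNextOpr findNextOpr_alt
  simpa using pv_main txt.toList 0 (Nat.zero_le _)
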